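-- pv_equiv track=rewrite | github.com/Topseen-a/python_assignment | function_roasted/function_list.py | take_list
-- ===== SOURCE A (Python) =====
-- def take_list(words):
--     longest = 0
--     for elements in words:
--         if len(elements) > longest:
--             longest = len(elements)
--         if longest == len(elements):
--             item = elements
--     return (f'{item}, {longest}')
-- ===== SOURCE B (Python) =====
-- def take_list(words):
--     words = list(words)
--     longest = 0
--     for w in words:
--         if len(w) > longest:
--             longest = len(w)
--     for w in words:
--         if len(w) == longest:
--             item = w
--     return f'{item}, {longest}'
-- ===== Notes on version B (the rewrite author's own statement) =====
-- stated objective: simpler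
-- what changed: Replaces A's single fold carrying a coupled (longest, item) state with two independent plain passes: one computing the max length, one picking the last word of that length.
-- outside the precondition, e.g. on take_list([]): A raises UnboundLocalError, B raises UnboundLocalError
import Mathlib
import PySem

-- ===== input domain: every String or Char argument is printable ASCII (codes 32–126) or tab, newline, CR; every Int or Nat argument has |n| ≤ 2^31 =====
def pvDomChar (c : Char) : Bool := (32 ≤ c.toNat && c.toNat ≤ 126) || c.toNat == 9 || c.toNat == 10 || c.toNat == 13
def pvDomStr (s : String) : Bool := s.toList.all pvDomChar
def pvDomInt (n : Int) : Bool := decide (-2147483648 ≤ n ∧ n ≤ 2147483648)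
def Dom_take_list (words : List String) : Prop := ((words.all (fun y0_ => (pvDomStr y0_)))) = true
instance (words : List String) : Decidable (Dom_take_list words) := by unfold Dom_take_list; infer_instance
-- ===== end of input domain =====

-- B replaces A's single fold over a coupled (longest, item) state by two independent passes
-- (max length first, then last word of that length); return value only, same on all nonempty inputs.

-- ===== PORT A =====
-- single pass: state = (longest, item); item is none until first assignment (UnboundLocalError on empty input)
def take_list (words : List String) : String :=
  let st := words.foldl
    (fun (p : Int × Option String) elements =>
      let longest := if (PySem.Str.len elements) > p.1 then PySem.Str.len elements else p.1
      let item := if longest = PySem.Str.len elements then some elements else p.2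
      (longest, item))
    (0, none)
  match st.2 with
  | some item => item ++ ", " ++ PySem.Int.toStr st.1
  | none => ""   -- unreachable under Pre_take_list (Python raises UnboundLocalError)

-- ===== PORT B =====
def take_list_alt (words : List String) : String :=
  let longest := words.foldl (fun l w => if (PySem.Str.len w) > l then PySem.Str.len w else l) 0
  let item := words.foldl (fun (it : Option String) w => if (PySem.Str.len w) = longest then some w else it) none
  match item with
  | some item => item ++ ", " ++ PySem.Int.toStr longest
  | none => ""   -- unreachable under Pre_take_list (Python raises UnboundLocalError)

-- ===== PRECONDITION & SPEC =====
-- A raises UnboundLocalError on the empty list ('item' never assigned); Pre_ excludes exactly that input.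
def Pre_take_list (words : List String) : Prop := words ≠ []
instance (words : List String) : Decidable (Pre_take_list words) := by unfold Pre_take_list; infer_instance
def pvWitness_take_list : List String := (["ab", "c", "de"])

def Spec_take_list (words : List String) (out : String) : Prop := out = take_list_alt words
instance (words : List String) (out : String) : Decidable (Spec_take_list words out) := by unfold Spec_take_list; infer_instance

-- ===== CLAIM (what is proved, stated in full; the proofs are below) =====
def Claim_equal_take_list : Prop := ∀ (words : List String), Dom_take_list words → Pre_take_list words → Spec_take_list words (take_list words)

-- ===== LEMMAS AND PROOFS =====

-- B's first loop, parameterised by the accumulator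
def pvMaxL (ws : List String) (l : Int) : Int :=
  ws.foldl (fun l w => if (PySem.Str.len w) > l then PySem.Str.len w else l) l

-- B's second loop, parameterised by the target length and accumulator
def pvPick (L : Int) (ws : List String) (it : Option String) : Option String :=
  ws.foldl (fun it w => if (PySem.Str.len w) = L then some w else it) it

-- A's loop, parameterised by the state
def pvStepA (ws : List String) (p : Int × Option String) : Int × Option String :=
  ws.foldl
    (fun (p : Int × Option String) elements =>
      let longest := if (PySem.Str.len elements) > p.1 then PySem.Str.len elements else p.1
      let item := if longest = PySem.Str.len elements then some elements else p.2
      (longest, item))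
    p

theorem pvMaxL_cons (w : String) (ws : List String) (l : Int) :
    pvMaxL (w :: ws) l = pvMaxL ws (if (PySem.Str.len w) > l then PySem.Str.len w else l) := rfl

theorem pvPick_cons (L : Int) (w : String) (ws : List String) (it : Option String) :
    pvPick L (w :: ws) it = pvPick L ws (if (PySem.Str.len w) = L then some w else it) := rfl

theorem pvMaxL_le (ws : List String) (l : Int) : l ≤ pvMaxL ws l := by
  induction ws generalizing l with
  | nil => simp [pvMaxL]
  | cons w ws ih =>
    rw [pvMaxL_cons]
    refine le_trans ?_ (ih _)
    split <;> omega

theorem pvMaxL_attained (ws : List String) (l : Int)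
    (h : pvMaxL ws l ≠ l) : ∃ x ∈ ws, PySem.Str.len x = pvMaxL ws l := by
  induction ws generalizing l with
  | nil => simp [pvMaxL] at h
  | cons w ws ih =>
    rw [pvMaxL_cons] at h ⊢
    by_cases hw : pvMaxL ws (if PySem.Str.len w > l then PySem.Str.len w else l)
        = (if PySem.Str.len w > l then PySem.Str.len w else l)
    · rw [hw] at h ⊢
      by_cases hg : PySem.Str.len w > l
      · exact ⟨w, by simp, by rw [if_pos hg]⟩
      · exact absurd (if_neg hg) h
    · obtain ⟨x, hx, he⟩ := ih _ hw
      exact ⟨x, by simp [hx], he⟩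

theorem pvPick_irrel (L : Int) (ws : List String) (a b : Option String)
    (h : ∃ x ∈ ws, PySem.Str.len x = L) : pvPick L ws a = pvPick L ws b := by
  induction ws generalizing a b with
  | nil => simp at h
  | cons w ws ih =>
    rw [pvPick_cons, pvPick_cons]
    by_cases hw : PySem.Str.len w = L
    · rw [if_pos hw, if_pos hw]
    · rw [if_neg hw, if_neg hw]
      obtain ⟨x, hx, he⟩ := h
      rcases List.mem_cons.mp hx with rfl | hx
      · exact absurd he hw
      · exact ih a b ⟨x, hx, he⟩

theorem pvStepA_eq (ws : List String) (l : Int) (it : Option String) :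
    pvStepA ws (l, it) = (pvMaxL ws l, pvPick (pvMaxL ws l) ws it) := by
  induction ws generalizing l it with
  | nil => rfl
  | cons w ws ih =>
    have hstep : pvStepA (w :: ws) (l, it)
        = pvStepA ws (if (PySem.Str.len w) > l then PySem.Str.len w else l,
            if (if (PySem.Str.len w) > l then PySem.Str.len w else l) = PySem.Str.len w
              then some w else it) := rfl
    set l' := if (PySem.Str.len w) > l then PySem.Str.len w else l with hl'
    set it' := if l' = PySem.Str.len w then some w else it with hit'
    rw [hstep, ih, pvMaxL_cons]
    set L := pvMaxL ws l' with hL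
    refine Prod.ext rfl ?_
    rw [pvPick_cons]
    by_cases h1 : l' = PySem.Str.len w
    · by_cases h2 : PySem.Str.len w = L
      · rw [hit', if_pos h1, if_pos h2]
      · have hne : L ≠ l' := fun he => h2 (by omega)
        exact pvPick_irrel L ws it' _ (pvMaxL_attained ws l' hne)
    · have hlt : PySem.Str.len w < l' := by
        rw [hl'] at h1 ⊢
        by_cases hg : PySem.Str.len w > l
        · exact absurd (if_pos hg) h1
        · rw [if_neg hg] at h1 ⊢
          omega
      have hL' : l' ≤ L := pvMaxL_le ws l'
      have h2 : ¬ PySem.Str.len w = L := by omega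
      rw [hit', if_neg h1, if_neg h2]

-- ===== VERDICT (by name: the statement is the Claim_ definition above) =====
theorem take_list_spec : Claim_equal_take_list := by
  intro words _ _
  show take_list words = take_list_alt words
  unfold take_list take_list_alt
  have h := pvStepA_eq words 0 none
  simp only [pvStepA, pvMaxL, pvPick] at h
  rw [h]
  rfl
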